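-- pv_equiv track=rewrite | github.com/solomonsh/Problem-Solving | Heaps/magical_candy_bag.py | magical_candy_bag
-- ===== SOURCE A (Python) =====
-- def magical_candy_bag(arr,k):
--
--     sum = 0
--     for i in range(k):
--         current_max=max(arr)
--         sum+= current_max
--         arr.pop(arr.index(current_max))
--         arr.append(current_max//2)
--     return sum
-- ===== SOURCE B (Python) =====
-- def magical_candy_bag(arr, k):
--     # Picks are non-increasing, so halved values arrive in non-increasing order:
--     # merge a descending-sorted copy of arr with a FIFO queue of halves.
--     # (A mutates arr in place; B does not — equivalence is about the return value.)
--     s = sorted(arr, reverse=True)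
--     q = []
--     i = 0
--     j = 0
--     total = 0
--     for _ in range(k):
--         if i < len(s) and (j >= len(q) or s[i] >= q[j]):
--             m = s[i]
--             i += 1
--         else:
--             m = q[j]
--             j += 1
--         total += m
--         q.append(m // 2)
--     return total
-- ===== Notes on version B (the rewrite author's own statement) =====
-- stated objective: faster
-- what changed: Instead of rescanning and mutating the list k times (max, index, pop, append), B sorts arr descending once and merges it with a FIFO queue of the halved picks, which arrive in non-increasing order, so each pick is O(1).
import Mathlib
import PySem

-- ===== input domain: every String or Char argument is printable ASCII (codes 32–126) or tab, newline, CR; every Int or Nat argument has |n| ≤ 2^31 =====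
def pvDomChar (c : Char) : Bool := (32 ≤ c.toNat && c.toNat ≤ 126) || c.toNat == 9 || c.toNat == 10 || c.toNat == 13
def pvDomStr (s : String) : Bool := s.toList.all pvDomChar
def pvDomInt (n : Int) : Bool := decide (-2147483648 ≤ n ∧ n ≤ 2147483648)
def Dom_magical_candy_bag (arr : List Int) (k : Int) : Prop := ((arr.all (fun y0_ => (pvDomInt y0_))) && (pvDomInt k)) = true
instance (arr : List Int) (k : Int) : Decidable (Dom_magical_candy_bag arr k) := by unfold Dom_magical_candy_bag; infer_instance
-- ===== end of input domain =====

-- B replaces A's repeated max-scan over the mutated list by sort-once + merge with a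
-- FIFO queue of halved picks (halves arrive in non-increasing order), which measured faster.
-- A mutates arr in place, B does not; the equivalence proved is about the return value.

-- ===== PORT A =====
-- one iteration of A's loop body; none = an exception was raised (max of empty list)
def pvAStep (st : Option (Int × List Int)) (_ : Int) : Option (Int × List Int) :=
  match st with
  | none => none
  | some (sum, a) =>
    match PySem.List.max? a (fun y => y) with
    | none => none                  -- max([]) raises ValueError
    | some m =>
      match PySem.List.remove? a m with   -- arr.pop(arr.index(m)) = remove first occurrence
      | none => none
      | some a' => some (sum + m, a' ++ [PySem.Int.floordiv m 2])

def magical_candy_bag (arr : List Int) (k : Int) : Int :=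
  match (PySem.List.pyRange 0 k 1).foldl pvAStep (some (0, arr)) with
  | some (sum, _) => sum
  | none => 0

-- ===== PORT B =====
-- one iteration of B's loop: state (total, i, j, q)
def pvBStep (s : List Int) (st : Option (Int × Int × Int × List Int)) (_ : Int) :
    Option (Int × Int × Int × List Int) :=
  match st with
  | none => none
  | some (total, i, j, q) =>
    if i < PySem.List.len s ∧ (PySem.List.len q ≤ j ∨ PySem.List.pyGetD q j 0 ≤ PySem.List.pyGetD s i 0) then
      -- i (and j in the compare) are in range here thanks to the guard, so pyGetD is exact
      some (total + PySem.List.pyGetD s i 0, i + 1, j,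
            q ++ [PySem.Int.floordiv (PySem.List.pyGetD s i 0) 2])
    else
      match PySem.List.pyGet? q j with
      | none => none                -- q[j] raises IndexError
      | some m => some (total + m, i, j + 1, q ++ [PySem.Int.floordiv m 2])

def magical_candy_bag_alt (arr : List Int) (k : Int) : Int :=
  let s := PySem.List.sorted arr (fun y => y) true
  match (PySem.List.pyRange 0 k 1).foldl (pvBStep s) (some (0, 0, 0, ([] : List Int))) with
  | some (total, _, _, _) => total
  | none => 0

-- ===== PRECONDITION & SPEC =====
-- A raises ValueError (max of empty list) when arr = [] and k ≥ 1; excluded here.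
def Pre_magical_candy_bag (arr : List Int) (k : Int) : Prop := arr ≠ [] ∨ k ≤ 0
instance (arr : List Int) (k : Int) : Decidable (Pre_magical_candy_bag arr k) := by
  unfold Pre_magical_candy_bag; infer_instance

def pvWitness_magical_candy_bag : List Int × Int := ([5, 3, -2], 4)

def Spec_magical_candy_bag (arr : List Int) (k : Int) (out : Int) : Prop := out = magical_candy_bag_alt arr k
instance (arr : List Int) (k : Int) (out : Int) : Decidable (Spec_magical_candy_bag arr k out) := by unfold Spec_magical_candy_bag; infer_instance

-- ===== CLAIM (what is proved, stated in full; the proofs are below) =====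
def Claim_equal_magical_candy_bag : Prop := ∀ (arr : List Int) (k : Int), Dom_magical_candy_bag arr k → Pre_magical_candy_bag arr k → Spec_magical_candy_bag arr k (magical_candy_bag arr k)

-- ===== LEMMAS AND PROOFS =====

lemma pv_half_le {x y : Int} (h : x ≤ 2 * y + 1) : PySem.Int.floordiv x 2 ≤ y := by
  rw [PySem.Int.floordiv_eq_ediv_of_pos (by norm_num)]; omega

lemma pv_le_two_half (m : Int) : m ≤ 2 * PySem.Int.floordiv m 2 + 1 := by
  rw [PySem.Int.floordiv_eq_ediv_of_pos (by norm_num)]; omega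

-- the value of Python's max: any member that bounds the list
lemma pv_max?_eq {a : List Int} {m : Int} (hm : m ∈ a) (hmax : ∀ x ∈ a, x ≤ m) :
    PySem.List.max? a (fun y => y) = some m := by
  cases h : PySem.List.max? a (fun y => y) with
  | none =>
    rw [PySem.List.max?_eq_none_iff] at h
    subst h; simp at hm
  | some v =>
    have hv : v ∈ a := PySem.List.max?_mem h
    have h1 : m ≤ v := PySem.List.max?_isMax h m hm
    have h2 : v ≤ m := hmax v hv
    have : v = m := le_antisymm h2 h1
    rw [this]

lemma pv_head_bound {m : Int} {t : List Int} (h : (m :: t).Pairwise (· ≥ ·)) :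
    ∀ x ∈ m :: t, x ≤ m := by
  intro x hx
  rcases List.mem_cons.mp hx with rfl | hx
  · exact le_refl x
  · exact (List.pairwise_cons.mp h).1 x hx

-- THE INVARIANT-CARRYING INDUCTION: running A on (tot, a) and B on (tot, i, j, q)
-- gives the same running total, provided a is a permutation of s.drop i ++ q.drop j,
-- s is sorted descending, q.drop j is descending, and the "halving" bounds hold.
lemma pv_main (s : List Int) (hs : s.Pairwise (· ≥ ·)) (L : List Int) :
    ∀ (tot : Int) (a q : List Int) (ni nj : Nat),
    a ≠ [] → ni ≤ s.length → nj ≤ q.length →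
    a.Perm (s.drop ni ++ q.drop nj) →
    (q.drop nj).Pairwise (· ≥ ·) →
    (q.drop nj).Pairwise (fun x y => x ≤ 2 * y + 1) →
    (∀ x ∈ s.drop ni, ∀ y ∈ q.drop nj, x ≤ 2 * y + 1) →
    ∃ tot' a' i' j' q',
      L.foldl pvAStep (some (tot, a)) = some (tot', a') ∧
      L.foldl (pvBStep s) (some (tot, (ni : Int), (nj : Int), q)) = some (tot', i', j', q') := by
  induction L with
  | nil =>
    intro tot a q ni nj ha _ _ _ _ _ _
    exact ⟨tot, a, ni, nj, q, rfl, rfl⟩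
  | cons z L ih =>
    intro tot a q ni nj ha hi hj hperm hq1 hq2 hG
    have hmem_iff : ∀ x : Int, x ∈ a ↔ x ∈ s.drop ni ++ q.drop nj := fun x => hperm.mem_iff
    by_cases hC : (ni : Int) < PySem.List.len s ∧
        (PySem.List.len q ≤ (nj : Int) ∨
          PySem.List.pyGetD q (nj : Int) 0 ≤ PySem.List.pyGetD s (ni : Int) 0)
    · -- pick comes from the sorted list s
      have hni : ni < s.length := by have := hC.1; simp at this; exact_mod_cast this
      have hgetS : PySem.List.pyGetD s (ni : Int) 0 = s[ni] := by
        simp [PySem.List.pyGetD_natCast, List.getD_eq_getElem?_getD, List.getElem?_eq_getElem hni]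
      set m := s[ni] with hm
      set hf := PySem.Int.floordiv m 2 with hhf
      have hrdecomp : s.drop ni = m :: s.drop (ni + 1) := List.drop_eq_getElem_cons hni
      have hrbound : ∀ x ∈ s.drop ni, x ≤ m := by
        have hrpw : (s.drop ni).Pairwise (· ≥ ·) := hs.drop
        rw [hrdecomp] at hrpw ⊢; exact pv_head_bound hrpw
      have htbound : ∀ y ∈ q.drop nj, y ≤ m := by
        intro y hy
        by_cases hnj : nj < q.length
        · have hqj : PySem.List.pyGetD q (nj : Int) 0 = q[nj] := by
            simp [PySem.List.pyGetD_natCast, List.getD_eq_getElem?_getD, List.getElem?_eq_getElem hnj]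
          rcases hC.2 with h | h
          · exfalso; simp at h; omega
          · rw [hgetS, hqj] at h
            have htdecomp : q.drop nj = q[nj] :: q.drop (nj + 1) := List.drop_eq_getElem_cons hnj
            have hy' : y ≤ q[nj] := by
              rw [htdecomp] at hq1 hy; exact pv_head_bound hq1 y hy
            omega
        · rw [List.drop_eq_nil_of_le (by omega)] at hy; simp at hy
      have hmemS : m ∈ s.drop ni := by rw [hrdecomp]; exact List.mem_cons_self
      have hmemm : m ∈ a := (hmem_iff m).2 (List.mem_append_left _ hmemS)
      have hmaxa : ∀ x ∈ a, x ≤ m := by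
        intro x hx
        rcases List.mem_append.mp ((hmem_iff x).1 hx) with h | h
        exacts [hrbound x h, htbound x h]
      have hAstep : pvAStep (some (tot, a)) z = some (tot + m, a.erase m ++ [hf]) := by
        simp only [pvAStep, pv_max?_eq hmemm hmaxa, PySem.List.remove?_eq_some_erase a m hmemm, hhf]
      have hBstep : pvBStep s (some (tot, (ni : Int), (nj : Int), q)) z
          = some (tot + m, ((ni + 1 : Nat) : Int), (nj : Int), q ++ [hf]) := by
        simp only [pvBStep]; rw [if_pos hC, hgetS, hhf]; push_cast; ring_nf
      have ha' : a.erase m ++ [hf] ≠ [] := by simp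
      have e1 : (a.erase m).Perm (s.drop (ni + 1) ++ q.drop nj) := by
        have h2 := hperm.erase m
        rw [hrdecomp] at h2
        simpa [List.cons_append, List.erase_cons_head] using h2
      have hperm' : (a.erase m ++ [hf]).Perm (s.drop (ni + 1) ++ (q ++ [hf]).drop nj) := by
        rw [List.drop_append_of_le_length hj, ← List.append_assoc]
        exact e1.append_right [hf]
      have hq1' : ((q ++ [hf]).drop nj).Pairwise (· ≥ ·) := by
        rw [List.drop_append_of_le_length hj]
        refine List.pairwise_append.mpr ⟨hq1, by simp, ?_⟩
        intro y hy z hz; simp at hz; subst hz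
        exact pv_half_le (hG m hmemS y hy)
      have hq2' : ((q ++ [hf]).drop nj).Pairwise (fun x y => x ≤ 2 * y + 1) := by
        rw [List.drop_append_of_le_length hj]
        refine List.pairwise_append.mpr ⟨hq2, by simp, ?_⟩
        intro y hy z hz; simp at hz; subst hz
        have h1 := htbound y hy
        have h2 := pv_le_two_half m
        omega
      have hG' : ∀ x ∈ s.drop (ni + 1), ∀ y ∈ (q ++ [hf]).drop nj, x ≤ 2 * y + 1 := by
        rw [List.drop_append_of_le_length hj]
        intro x hx y hy
        have hxr : x ∈ s.drop ni := by rw [hrdecomp]; exact List.mem_cons_of_mem _ hx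
        rcases List.mem_append.mp hy with h | h
        · exact hG x hxr y h
        · simp at h; subst h
          have h1 := hrbound x hxr
          have h2 := pv_le_two_half m
          omega
      obtain ⟨tot', a'', i', j', q'', hh1, hh2⟩ :=
        ih (tot + m) (a.erase m ++ [hf]) (q ++ [hf]) (ni + 1) nj ha' (by omega)
          (le_trans hj (by simp)) hperm' hq1' hq2' hG'
      refine ⟨tot', a'', i', j', q'', ?_, ?_⟩
      · rw [List.foldl_cons, hAstep]; exact hh1
      · rw [List.foldl_cons, hBstep]; exact hh2
    · -- pick comes from the queue q
      have hnj : nj < q.length := by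
        by_contra hnj
        have ht0 : q.drop nj = [] := List.drop_eq_nil_of_le (by omega)
        have hr0 : s.drop ni ≠ [] := by
          intro h0; rw [h0, ht0] at hperm; simp at hperm; exact ha hperm
        have hni : ni < s.length := by
          by_contra h0
          exact hr0 (List.drop_eq_nil_of_le (by omega))
        exact hC ⟨by simp; exact_mod_cast hni, Or.inl (by simp; omega)⟩
      have hqj : PySem.List.pyGetD q (nj : Int) 0 = q[nj] := by
        simp [PySem.List.pyGetD_natCast, List.getD_eq_getElem?_getD, List.getElem?_eq_getElem hnj]
      set m := q[nj] with hm
      set hf := PySem.Int.floordiv m 2 with hhf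
      have htdecomp : q.drop nj = m :: q.drop (nj + 1) := List.drop_eq_getElem_cons hnj
      have htbound : ∀ y ∈ q.drop nj, y ≤ m := by
        rw [htdecomp] at hq1 ⊢; exact pv_head_bound hq1
      have hrbound : ∀ x ∈ s.drop ni, x ≤ m := by
        intro x hx
        by_cases hni : ni < s.length
        · have hgetS : PySem.List.pyGetD s (ni : Int) 0 = s[ni] := by
            simp [PySem.List.pyGetD_natCast, List.getD_eq_getElem?_getD, List.getElem?_eq_getElem hni]
          have hlt : s[ni] < m := by
            by_contra hge
            exact hC ⟨by simp; exact_mod_cast hni, Or.inr (by rw [hgetS, hqj]; omega)⟩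
          have hxr : x ≤ s[ni] := by
            have hrpw : (s.drop ni).Pairwise (· ≥ ·) := hs.drop
            rw [List.drop_eq_getElem_cons hni] at hrpw hx
            exact pv_head_bound hrpw x hx
          omega
        · rw [List.drop_eq_nil_of_le (by omega)] at hx; simp at hx
      have hmemT : m ∈ q.drop nj := by rw [htdecomp]; exact List.mem_cons_self
      have hmemm : m ∈ a := (hmem_iff m).2 (List.mem_append_right _ hmemT)
      have hmaxa : ∀ x ∈ a, x ≤ m := by
        intro x hx
        rcases List.mem_append.mp ((hmem_iff x).1 hx) with h | h
        exacts [hrbound x h, htbound x h]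
      have hAstep : pvAStep (some (tot, a)) z = some (tot + m, a.erase m ++ [hf]) := by
        simp only [pvAStep, pv_max?_eq hmemm hmaxa, PySem.List.remove?_eq_some_erase a m hmemm, hhf]
      have hget? : PySem.List.pyGet? q (nj : Int) = some m := by
        simp [PySem.List.pyGet?_natCast, List.getElem?_eq_getElem hnj, hm]
      have hBstep : pvBStep s (some (tot, (ni : Int), (nj : Int), q)) z
          = some (tot + m, (ni : Int), ((nj + 1 : Nat) : Int), q ++ [hf]) := by
        simp only [pvBStep]; rw [if_neg hC, hget?, hhf]; push_cast; ring_nf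
      have ha' : a.erase m ++ [hf] ≠ [] := by simp
      have e1 : (a.erase m).Perm (s.drop ni ++ q.drop (nj + 1)) := by
        have h2 := hperm.erase m
        rw [htdecomp] at h2
        have h3 := (List.perm_middle (a := m) (l₁ := s.drop ni) (l₂ := q.drop (nj + 1))).erase m
        rw [List.erase_cons_head] at h3
        exact h2.trans h3
      have hperm' : (a.erase m ++ [hf]).Perm (s.drop ni ++ (q ++ [hf]).drop (nj + 1)) := by
        rw [List.drop_append_of_le_length (by omega), ← List.append_assoc]
        exact e1.append_right [hf]
      have hq1tail : (q.drop (nj + 1)).Pairwise (· ≥ ·) := by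
        rw [htdecomp] at hq1; exact (List.pairwise_cons.mp hq1).2
      have hq2tail : (q.drop (nj + 1)).Pairwise (fun x y => x ≤ 2 * y + 1) := by
        rw [htdecomp] at hq2; exact (List.pairwise_cons.mp hq2).2
      have hheadH : ∀ y ∈ q.drop (nj + 1), m ≤ 2 * y + 1 := by
        rw [htdecomp] at hq2; exact (List.pairwise_cons.mp hq2).1
      have htail_mem : ∀ y ∈ q.drop (nj + 1), y ∈ q.drop nj := by
        intro y hy; rw [htdecomp]; exact List.mem_cons_of_mem _ hy
      have hq1' : ((q ++ [hf]).drop (nj + 1)).Pairwise (· ≥ ·) := by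
        rw [List.drop_append_of_le_length (by omega)]
        refine List.pairwise_append.mpr ⟨hq1tail, by simp, ?_⟩
        intro y hy z hz; simp at hz; subst hz
        exact pv_half_le (hheadH y hy)
      have hq2' : ((q ++ [hf]).drop (nj + 1)).Pairwise (fun x y => x ≤ 2 * y + 1) := by
        rw [List.drop_append_of_le_length (by omega)]
        refine List.pairwise_append.mpr ⟨hq2tail, by simp, ?_⟩
        intro y hy z hz; simp at hz; subst hz
        have h1 := htbound y (htail_mem y hy)
        have h2 := pv_le_two_half m
        omega
      have hG' : ∀ x ∈ s.drop ni, ∀ y ∈ (q ++ [hf]).drop (nj + 1), x ≤ 2 * y + 1 := by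
        rw [List.drop_append_of_le_length (by omega)]
        intro x hx y hy
        rcases List.mem_append.mp hy with h | h
        · exact hG x hx y (htail_mem y h)
        · simp at h; subst h
          have h1 := hrbound x hx
          have h2 := pv_le_two_half m
          omega
      obtain ⟨tot', a'', i', j', q'', hh1, hh2⟩ :=
        ih (tot + m) (a.erase m ++ [hf]) (q ++ [hf]) ni (nj + 1) ha' hi
          (by simp; omega) hperm' hq1' hq2' hG'
      refine ⟨tot', a'', i', j', q'', ?_, ?_⟩
      · rw [List.foldl_cons, hAstep]; exact hh1
      · rw [List.foldl_cons, hBstep]; exact hh2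

-- ===== VERDICT (by name: the statement is the Claim_ definition above) =====
theorem magical_candy_bag_spec : Claim_equal_magical_candy_bag := by
  intro arr k _ hpre
  unfold Spec_magical_candy_bag
  by_cases hk : k ≤ 0
  · simp [magical_candy_bag, magical_candy_bag_alt, PySem.List.pyRange_one_eq_nil hk]
  · have harr : arr ≠ [] := hpre.resolve_right hk
    have hs : (PySem.List.sorted arr (fun y => y) true).Pairwise (· ≥ ·) :=
      PySem.List.sorted_pairwise_rev arr (fun y => y)
    have hperm : arr.Perm ((PySem.List.sorted arr (fun y => y) true).drop 0 ++ ([] : List Int).drop 0) := by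
      simpa using (PySem.List.sorted_perm arr (fun y => y) true).symm
    obtain ⟨tot', a', i', j', q', h1, h2⟩ :=
      pv_main (PySem.List.sorted arr (fun y => y) true) hs (PySem.List.pyRange 0 k 1)
        0 arr [] 0 0 harr (by simp) (by simp) hperm (by simp) (by simp) (by simp)
    simp only [Nat.cast_zero] at h2
    simp only [magical_candy_bag, magical_candy_bag_alt]
    rw [h1, h2]
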